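-- pv_equiv track=rewrite | github.com/bdzimmer/handwriting | handwriting/data.py | pages
-- ===== SOURCE A (Python) =====
-- SAMPLE_FILENAMES = (
--     ["data/20170929_" + str(idx) + ".png.sample.pkl.1" # 0-4
--      for idx in range(1, 6)] +
--     ["data/20171120_" + str(idx) + ".png.sample.pkl.1" # 5-8
--      for idx in range(1, 5)] +
--     ["data/20171209_" + str(idx) + ".png.sample.pkl.1" # 9-12
--      for idx in range(1, 5)])
--
-- def  pages(train_idxs, test_idxs):
--
--     train_filenames = [
--         SAMPLE_FILENAMES[idx]
--         for idx in range(len(SAMPLE_FILENAMES))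
--         if idx in train_idxs]
--
--     test_filenames = [
--         SAMPLE_FILENAMES[idx]
--         for idx in range(len(SAMPLE_FILENAMES))
--         if idx in test_idxs]
--
--     return train_filenames, test_filenames
-- ===== SOURCE B (Python) =====
-- SAMPLE_FILENAMES = (
--     ["data/20170929_" + str(idx) + ".png.sample.pkl.1" # 0-4
--      for idx in range(1, 6)] +
--     ["data/20171120_" + str(idx) + ".png.sample.pkl.1" # 5-8
--      for idx in range(1, 5)] +
--     ["data/20171209_" + str(idx) + ".png.sample.pkl.1" # 9-12
--      for idx in range(1, 5)])
--
-- def pages(train_idxs, test_idxs):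
--     # Instead of scanning every index of SAMPLE_FILENAMES and testing membership,
--     # iterate over the GIVEN index lists: keep the in-range ones, deduplicate,
--     # sort ascending (A's output order), and look the filenames up directly.
--     n = len(SAMPLE_FILENAMES)
--
--     def pick(idxs):
--         return [SAMPLE_FILENAMES[i]
--                 for i in sorted({i for i in idxs if 0 <= i < n})]
--
--     return pick(train_idxs), pick(test_idxs)
-- ===== Notes on version B (the rewrite author's own statement) =====
-- stated objective: faster
-- what changed: Instead of scanning every index of SAMPLE_FILENAMES twice and testing list membership of each index in the given lists (O(n*m)), B iterates over each given index list once, keeps the in-range indices, deduplicates with a set, sorts ascending (exactly A's output order), and looks each filename up directly.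
import Mathlib
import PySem

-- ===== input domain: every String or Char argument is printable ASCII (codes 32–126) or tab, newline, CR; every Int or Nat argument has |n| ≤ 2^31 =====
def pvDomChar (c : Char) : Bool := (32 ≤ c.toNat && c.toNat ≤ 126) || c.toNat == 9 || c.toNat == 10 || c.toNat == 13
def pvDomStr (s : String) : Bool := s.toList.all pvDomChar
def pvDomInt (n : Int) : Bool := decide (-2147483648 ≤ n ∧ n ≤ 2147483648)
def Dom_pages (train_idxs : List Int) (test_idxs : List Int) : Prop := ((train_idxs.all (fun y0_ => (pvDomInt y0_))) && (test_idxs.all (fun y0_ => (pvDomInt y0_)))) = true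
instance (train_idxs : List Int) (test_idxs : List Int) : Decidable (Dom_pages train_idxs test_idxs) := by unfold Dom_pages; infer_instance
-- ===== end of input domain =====

-- B replaces A's two full scans of SAMPLE_FILENAMES (membership test per index) by sorting the
-- deduplicated in-range given indices and looking the filenames up directly (objective: faster; a timing run measured B faster).

-- ===== PORT A =====
-- module constant SAMPLE_FILENAMES
def pvSampleFilenames : List String :=
  ((PySem.List.pyRange 1 6 1).map
    (fun idx => "data/20170929_" ++ PySem.Int.toStr idx ++ ".png.sample.pkl.1")) ++
  ((PySem.List.pyRange 1 5 1).map
    (fun idx => "data/20171120_" ++ PySem.Int.toStr idx ++ ".png.sample.pkl.1")) ++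
  ((PySem.List.pyRange 1 5 1).map
    (fun idx => "data/20171209_" ++ PySem.Int.toStr idx ++ ".png.sample.pkl.1"))

-- SAMPLE_FILENAMES[idx] is indexed only for idx in range(len(...)), so pyGetD's default is never used
def pages (train_idxs : List Int) (test_idxs : List Int) : List String × List String :=
  let train_filenames :=
    (PySem.List.pyRange 0 (Int.ofNat pvSampleFilenames.length) 1).foldl
      (fun acc idx =>
        if train_idxs.contains idx then acc ++ [PySem.List.pyGetD pvSampleFilenames idx ""] else acc) []
  let test_filenames :=
    (PySem.List.pyRange 0 (Int.ofNat pvSampleFilenames.length) 1).foldl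
      (fun acc idx =>
        if test_idxs.contains idx then acc ++ [PySem.List.pyGetD pvSampleFilenames idx ""] else acc) []
  (train_filenames, test_filenames)

-- ===== PORT B =====
-- pick(idxs): sorted set of in-range indices, then direct lookups
def pvPick (idxs : List Int) : List String :=
  (PySem.List.sorted
      (PySem.Set.ofList (idxs.filter
        (fun i => decide (0 ≤ i) && decide (i < (Int.ofNat pvSampleFilenames.length)))))
      (fun x => x) false).map
    (fun i => PySem.List.pyGetD pvSampleFilenames i "")

def pages_alt (train_idxs : List Int) (test_idxs : List Int) : List String × List String :=
  (pvPick train_idxs, pvPick test_idxs)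

-- ===== PRECONDITION & SPEC =====
def Spec_pages (train_idxs : List Int) (test_idxs : List Int) (out : List String × List String) : Prop := out = pages_alt train_idxs test_idxs
instance (train_idxs : List Int) (test_idxs : List Int) (out : List String × List String) : Decidable (Spec_pages train_idxs test_idxs out) := by unfold Spec_pages; infer_instance

-- ===== CLAIM (what is proved, stated in full; the proofs are below) =====
def Claim_equal_pages : Prop := ∀ (train_idxs : List Int) (test_idxs : List Int), Dom_pages train_idxs test_idxs → Spec_pages train_idxs test_idxs (pages train_idxs test_idxs)

-- ===== LEMMAS AND PROOFS =====

-- A's per-list filter of range(n) equals B's pick: the in-range members of idxs, sorted ascending without duplicates.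
theorem pvPick_eq (idxs : List Int) :
    (PySem.List.pyRange 0 (Int.ofNat pvSampleFilenames.length) 1).foldl
      (fun acc idx =>
        if idxs.contains idx then acc ++ [PySem.List.pyGetD pvSampleFilenames idx ""] else acc) []
    = pvPick idxs := by
  rw [PySem.List.foldl_append_if (fun idx => idxs.contains idx)
        (fun idx => PySem.List.pyGetD pvSampleFilenames idx "")]
  unfold pvPick
  rw [PySem.List.sorted_eq_of_perm_of_pairwise_lt _
        ((PySem.List.pyRange 0 (Int.ofNat pvSampleFilenames.length) 1).filter
          (fun idx => idxs.contains idx)) (fun x => x)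
        ?_ ?_]
  · simp
  · rw [List.perm_ext_iff_of_nodup
        ((PySem.List.nodup_pyRange_one _ _).filter _) (PySem.Set.nodup_ofList _)]
    intro a
    simp [List.mem_filter, PySem.Set.mem_ofList, PySem.List.mem_pyRange_one, and_comm]
  · exact (PySem.List.pairwise_lt_pyRange_one _ _).filter _

-- ===== VERDICT (by name: the statement is the Claim_ definition above) =====
theorem pages_spec : Claim_equal_pages := by
  intro train_idxs test_idxs _
  unfold Spec_pages pages pages_alt
  rw [pvPick_eq, pvPick_eq]
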